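-- pv_equiv track=rewrite | github.com/Maksim-Burtsev/PyClickHouseMigrator | py_clickhouse_migrator/migration_parser.py | _trim_section
-- ===== SOURCE A (Python) =====
-- def _trim_section(lines: list[str]) -> str:
--     start = 0
--     end = len(lines)
--     while start < end and not lines[start].strip():
--         start += 1
--     while end > start and not lines[end - 1].strip():
--         end -= 1
--     return "\n".join(lines[start:end])
-- ===== SOURCE B (Python) =====
-- def _trim_section(lines: list[str]) -> str:
--     def drop_blank(xs):
--         for k, l in enumerate(xs):
--             if l.strip():
--                 return xs[k:]
--         return []
--     core = drop_blank(drop_blank(lines)[::-1])[::-1]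
--     return "\n".join(core)
-- ===== Notes on version B (the rewrite author's own statement) =====
-- stated objective: simpler
-- what changed: Replaces the two index-shrinking while loops and slice with a single recursive drop_blank helper applied to the list and to its reversal, so no indices or slice arithmetic are needed.
import Mathlib
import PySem

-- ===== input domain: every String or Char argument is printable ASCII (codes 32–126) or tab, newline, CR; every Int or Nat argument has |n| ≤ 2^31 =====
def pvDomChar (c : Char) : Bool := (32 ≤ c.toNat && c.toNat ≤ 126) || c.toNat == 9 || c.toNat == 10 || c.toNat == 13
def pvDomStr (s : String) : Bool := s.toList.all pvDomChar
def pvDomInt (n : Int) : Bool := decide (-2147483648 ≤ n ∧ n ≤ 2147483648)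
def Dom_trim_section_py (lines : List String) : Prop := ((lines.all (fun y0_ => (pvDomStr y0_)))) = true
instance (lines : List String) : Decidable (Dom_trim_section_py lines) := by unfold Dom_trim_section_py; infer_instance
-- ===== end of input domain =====

-- B replaces A's two index-shrinking while loops and slice by one recursive
-- drop-blank helper applied to the list and to its reversal (objective: simpler).

-- ===== PORT A =====
-- while start < end and not lines[start].strip(): start += 1
-- lines[start] is always in range here (start < end ≤ len), so getD is exact.
def aLoop1 (lines : List String) (start fin : Nat) : Nat :=
  if start < fin ∧ PySem.Str.strip (lines.getD start "") = "" then
    aLoop1 lines (start + 1) fin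
  else start
termination_by fin - start
decreasing_by omega

-- while end > start and not lines[end - 1].strip(): end -= 1
-- lines[end-1] is always in range here (start < end ≤ len), so getD is exact.
def aLoop2 (lines : List String) (start fin : Nat) : Nat :=
  if start < fin ∧ PySem.Str.strip (lines.getD (fin - 1) "") = "" then
    aLoop2 lines start (fin - 1)
  else fin
termination_by fin
decreasing_by omega

def trim_section_py (lines : List String) : String :=
  let start := aLoop1 lines 0 lines.length
  let e := aLoop2 lines start lines.length
  PySem.Str.join "\n" (PySem.List.slice lines (some (start : Int)) (some (e : Int)))

-- ===== PORT B =====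
-- drop_blank: scan for the first non-blank line, return the suffix from it (else []);
-- the loop with early return 'return xs[k:]' is this structural recursion (xs[k:] = x :: rest).
def dropBlank : List String → List String
  | [] => []
  | x :: rest => if PySem.Str.strip x ≠ "" then x :: rest else dropBlank rest

-- xs[::-1] is List.reverse (PySem.List.slice?_none_none_neg_one)
def trim_section_py_alt (lines : List String) : String :=
  PySem.Str.join "\n" ((dropBlank ((dropBlank lines).reverse)).reverse)

-- ===== PRECONDITION & SPEC =====
def Spec_trim_section_py (lines : List String) (out : String) : Prop := out = trim_section_py_alt lines
instance (lines : List String) (out : String) : Decidable (Spec_trim_section_py lines out) := by unfold Spec_trim_section_py; infer_instance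

-- ===== CLAIM (what is proved, stated in full; the proofs are below) =====
def Claim_equal_trim_section_py : Prop := ∀ (lines : List String), Dom_trim_section_py lines → Spec_trim_section_py lines (trim_section_py lines)

-- ===== LEMMAS AND PROOFS =====

theorem aLoop1_le (lines : List String) (start fin : Nat) (h : start ≤ fin) :
    start ≤ aLoop1 lines start fin ∧ aLoop1 lines start fin ≤ fin := by
  generalize hk : fin - start = k
  induction k generalizing start with
  | zero =>
    rw [aLoop1, if_neg (by omega)]
    exact ⟨le_rfl, h⟩
  | succ k ih =>
    rw [aLoop1]
    split_ifs with hc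
    · have := ih (start + 1) (by omega) (by omega)
      omega
    · exact ⟨le_rfl, h⟩

theorem aLoop1_drop (lines : List String) (start : Nat) (h : start ≤ lines.length) :
    lines.drop (aLoop1 lines start lines.length) = dropBlank (lines.drop start) := by
  generalize hk : lines.length - start = k
  induction k generalizing start with
  | zero =>
    rw [aLoop1, if_neg (by omega)]
    have hst : lines.drop start = [] := by
      have : start = lines.length := by omega
      simp [this]
    rw [hst]
    rfl
  | succ k ih =>
    have hlt : start < lines.length := by omega
    have hget : lines.getD start "" = lines[start] := List.getD_eq_getElem lines "" hlt
    have hdrop : lines.drop start = lines[start] :: lines.drop (start + 1) :=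
      List.drop_eq_getElem_cons hlt
    rw [aLoop1, hdrop]
    by_cases hb : PySem.Str.strip lines[start] = ""
    · rw [if_pos ⟨hlt, by rw [hget]; exact hb⟩, ih (start + 1) hlt (by omega)]
      simp [dropBlank, hb]
    · rw [if_neg (by rw [hget]; tauto), hdrop, dropBlank, if_pos hb]

theorem aLoop2_take (lines : List String) (s fin : Nat) (hs : s ≤ fin)
    (hn : fin ≤ lines.length) :
    (lines.drop s).take (aLoop2 lines s fin - s) =
      (dropBlank (((lines.drop s).take (fin - s)).reverse)).reverse := by
  generalize hk : fin - s = k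
  induction k generalizing fin with
  | zero =>
    have hfs : fin = s := by omega
    rw [aLoop2, if_neg (by omega), hfs]
    simp [dropBlank]
  | succ k ih =>
    rw [← hk]
    have hk2 : k = fin - 1 - s := by omega
    have hsf : s < fin := by omega
    have h1 : fin - 1 < lines.length := by omega
    have hget : lines.getD (fin - 1) "" = lines[fin - 1] := List.getD_eq_getElem lines "" h1
    have hT : (lines.drop s).take (fin - s) =
        (lines.drop s).take (fin - 1 - s) ++ [lines[fin - 1]] := by
      have he : fin - s = (fin - 1 - s) + 1 := by omega
      have hg : (lines.drop s)[fin - 1 - s]? = some lines[fin - 1] := by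
        rw [List.getElem?_drop]
        have hs2 : s + (fin - 1 - s) = fin - 1 := by omega
        rw [hs2, List.getElem?_eq_getElem h1]
      rw [he, List.take_add_one, hg]
      simp
    rw [aLoop2]
    by_cases hb : PySem.Str.strip lines[fin - 1] = ""
    · rw [if_pos ⟨hsf, by rw [hget]; exact hb⟩, ih (fin - 1) (by omega) (by omega) (by omega),
        hk2, hT]
      simp [dropBlank, hb, List.reverse_append]
    · rw [if_neg (by rw [hget]; tauto), hT]
      simp [dropBlank, hb, List.reverse_append]

-- ===== VERDICT (by name: the statement is the Claim_ definition above) =====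
theorem trim_section_py_spec : Claim_equal_trim_section_py := by
  intro lines _
  unfold Spec_trim_section_py trim_section_py trim_section_py_alt
  have h1 := aLoop1_le lines 0 lines.length (Nat.zero_le _)
  set s := aLoop1 lines 0 lines.length with hs
  have hd : lines.drop s = dropBlank lines := by
    simpa using aLoop1_drop lines 0 (Nat.zero_le _)
  show PySem.Str.join "\n"
      (PySem.List.slice lines (some (s : Int)) (some (aLoop2 lines s lines.length : Int))) = _
  rw [PySem.List.slice_natCast, aLoop2_take lines s lines.length h1.2 le_rfl]
  rw [List.take_of_length_le (by simp), hd]
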